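-- pv_equiv track=rewrite | github.com/2JooYeon/Algorithm_Study | JooYeon/programmers_Q42578.py | solution
-- ===== SOURCE A (Python) =====
-- def solution(clothes):
--     answer = 1
--
--     item_count = {}
--
--     for item in clothes:
--         if (item[1] not in item_count):
--             item_count[item[1]] = 1
--         else:
--             item_count[item[1]] += 1
--
--     count_list = item_count.values()
--
--     for num in count_list:
--         # num+1에서 +1은 아예 선택 안할 수도 있는 경우의 수 고려
--         answer *= (num + 1)
--
--     # -1 하는 이유는 의상을 하나도 안입는 경우를 제외하기 위해서
--     return answer - 1
-- ===== SOURCE B (Python) =====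
-- def solution(clothes):
--     s = sorted(clothes, key=lambda x: x[1])
--     product = 1
--     i = 0
--     n = len(s)
--     while i < n:
--         j = i
--         while j < n and s[j][1] == s[i][1]:
--             j += 1
--         product *= (j - i + 1)
--         i = j
--     return product - 1
-- ===== Notes on version B (the rewrite author's own statement) =====
-- stated objective: alternative
-- what changed: Replaces the hash-map category counter with a sort-by-category followed by a single run-length scan over the sorted list, multiplying (run length + 1) per run.
import Mathlib
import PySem

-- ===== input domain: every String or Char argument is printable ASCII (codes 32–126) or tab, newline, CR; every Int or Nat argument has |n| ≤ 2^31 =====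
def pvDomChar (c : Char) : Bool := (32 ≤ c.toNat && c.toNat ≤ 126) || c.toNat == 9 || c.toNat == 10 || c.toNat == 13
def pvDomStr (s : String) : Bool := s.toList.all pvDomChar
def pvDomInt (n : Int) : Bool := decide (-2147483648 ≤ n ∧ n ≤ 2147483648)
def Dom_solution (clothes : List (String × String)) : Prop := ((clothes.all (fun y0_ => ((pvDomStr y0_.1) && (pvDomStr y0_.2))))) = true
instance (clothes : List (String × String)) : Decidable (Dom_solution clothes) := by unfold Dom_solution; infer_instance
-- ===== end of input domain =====

-- B replaces A's hash-map counter with sort-by-category + one run-length scan; equal return value, no speed claim.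

-- ===== PORT A =====
def solution (clothes : List (String × String)) : Int :=
  let item_count := clothes.foldl (fun d item =>
      if d.contains item.2 = false then d.insert item.2 (1 : Int)
      else d.insert item.2 (d.getD item.2 0 + 1)) PySem.Dict.empty
  let count_list := item_count.values
  let answer := count_list.foldl (fun a num => a * (num + 1)) (1 : Int)
  answer - 1

-- ===== PORT B =====
-- the inner while loop: length of the run of equal categories; outer loop = recursion on the rest
def prodRuns : List (String × String) → Int
  | [] => 1
  | x :: xs =>
    ((xs.takeWhile (fun y => y.2 == x.2)).length + 2) *
      prodRuns (xs.dropWhile (fun y => y.2 == x.2))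
termination_by l => l.length
decreasing_by
  simpa using Nat.lt_succ_of_le (List.length_dropWhile_le _ _)

def solution_alt (clothes : List (String × String)) : Int :=
  prodRuns (PySem.List.sorted clothes (fun x => x.2) false) - 1

-- ===== PRECONDITION & SPEC =====
def Spec_solution (clothes : List (String × String)) (out : Int) : Prop := out = solution_alt clothes
instance (clothes : List (String × String)) (out : Int) : Decidable (Spec_solution clothes out) := by unfold Spec_solution; infer_instance

-- ===== CLAIM (what is proved, stated in full; the proofs are below) =====
def Claim_equal_solution : Prop := ∀ (clothes : List (String × String)), Dom_solution clothes → Spec_solution clothes (solution clothes)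

-- ===== LEMMAS AND PROOFS =====

-- canonical value both sides are reduced to
def keyProd (ks : List String) : Int := ∏ k ∈ ks.toFinset, ((ks.count k : Int) + 1)

theorem foldl_mul_succ (l : List Int) (c : Int) :
    l.foldl (fun a n => a * (n + 1)) c = c * (l.map (· + 1)).prod := by
  induction l generalizing c with
  | nil => simp
  | cons n l ih => simp [List.foldl_cons, ih, mul_assoc]


theorem ofList_toFinset (ks : List String) :
    (PySem.Set.ofList ks).toFinset = ks.toFinset := by
  ext a; simp [List.mem_toFinset, PySem.Set.mem_ofList]


theorem solution_eq_keyProd (clothes : List (String × String)) :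
    solution clothes = keyProd (clothes.map (·.2)) - 1 := by
  unfold solution
  have h1 : clothes.foldl (fun d item =>
      if d.contains item.2 = false then d.insert item.2 (1 : Int)
      else d.insert item.2 (d.getD item.2 0 + 1)) PySem.Dict.empty
      = PySem.Dict.counter (clothes.map (·.2)) := by
    rw [← PySem.Dict.foldl_insert_getD_add_one_eq_counter, List.foldl_map]
    apply PySem.List.foldl_congr_mem
    intro d x _
    by_cases h : d.contains x.2 = false
    · rw [if_pos h, PySem.Dict.getD_of_not_contains d _ h]; norm_num
    · rw [if_neg h]
  simp only [h1]
  have hv : (PySem.Dict.counter (clothes.map (·.2))).values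
      = (PySem.Set.ofList (clothes.map (·.2))).map (fun k => ((clothes.map (·.2)).count k : Int)) := by
    simp only [PySem.Dict.values, PySem.Dict.items_counter, List.map_map]
    rfl
  rw [hv, foldl_mul_succ, one_mul, List.map_map]
  unfold keyProd
  rw [← ofList_toFinset, List.prod_toFinset _ (PySem.Set.nodup_ofList _)]
  congr 1

theorem prodRuns_sorted (l : List (String × String))
    (h : (l.map (·.2)).Pairwise (· ≤ ·)) :
    prodRuns l = keyProd (l.map (·.2)) := by
  induction l using prodRuns.induct with
  | case1 => simp [prodRuns, keyProd]
  | case2 x xs ih =>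
    set p : String × String → Bool := fun y => y.2 == x.2 with hp
    set t := xs.takeWhile p with hts
    set d := xs.dropWhile p with hds
    have hxs : t ++ d = xs := List.takeWhile_append_dropWhile
    -- facts from sortedness
    rw [List.map_cons, List.pairwise_cons] at h
    obtain ⟨h1, h2⟩ := h
    have ht : ∀ y ∈ t, y.2 = x.2 := by
      intro y hy
      have := List.mem_takeWhile_imp hy
      simpa [hp] using this
    have hd : ∀ y ∈ d, y.2 ≠ x.2 := by
      intro y hy
      match hdd : d, hy with
      | d0 :: d', hy =>
        have hy : y ∈ d0 :: d' := hy
        have hne : d ≠ [] := by rw [hdd]; simp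
        have pd0 : p (d.head hne) = false := List.head_dropWhile_not p hne
        have hd0 : d.head hne = d0 := by simp [hdd]
        rw [hd0] at pd0
        have hd0ne : d0.2 ≠ x.2 := by simpa [hp] using pd0
        have hd0mem : d0 ∈ xs := (List.dropWhile_sublist p).subset (hds ▸ List.mem_cons_self)
        have hklt : x.2 < d0.2 :=
          lt_of_le_of_ne (h1 d0.2 (List.mem_map_of_mem hd0mem)) (Ne.symm hd0ne)
        rcases List.mem_cons.mp hy with rfl | hy'
        · exact hd0ne
        · -- pairwise within d
          have hsub : (d.map (·.2)).Pairwise (· ≤ ·) :=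
            List.Pairwise.sublist ((List.dropWhile_sublist p).map _) h2
          rw [hdd, List.map_cons, List.pairwise_cons] at hsub
          have : d0.2 ≤ y.2 := hsub.1 _ (List.mem_map_of_mem hy')
          exact fun hcon => absurd (hcon ▸ this) (not_le_of_gt hklt)
    have hIH : prodRuns d = keyProd (d.map (·.2)) := by
      apply ih
      exact List.Pairwise.sublist ((List.dropWhile_sublist p).map _) h2
    -- counts
    have hmapl : (x :: xs).map (·.2) = x.2 :: (t.map (·.2) ++ d.map (·.2)) := by
      rw [List.map_cons, ← hxs, List.map_append]
    have hcnt_t : (t.map (·.2)).count x.2 = t.length := by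
      rw [List.count_eq_length.mpr]
      · simp
      · intro b hb
        obtain ⟨y, hy, rfl⟩ := List.mem_map.mp hb
        exact (ht y hy).symm
    have hcnt_d : (d.map (·.2)).count x.2 = 0 := by
      rw [List.count_eq_zero]
      intro hmem
      obtain ⟨y, hy, hyk⟩ := List.mem_map.mp hmem
      exact hd y hy hyk
    have hcnt : ((x :: xs).map (·.2)).count x.2 = t.length + 1 := by
      rw [hmapl, List.count_cons_self, List.count_append, hcnt_t, hcnt_d]
    have hknot : x.2 ∉ (d.map (·.2)).toFinset := by
      intro hmem
      obtain ⟨y, hy, hyk⟩ := List.mem_map.mp (List.mem_toFinset.mp hmem)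
      exact hd y hy hyk
    have hfin : ((x :: xs).map (·.2)).toFinset = insert x.2 ((d.map (·.2)).toFinset) := by
      ext a
      simp only [List.mem_toFinset, Finset.mem_insert, hmapl, List.mem_cons, List.mem_append]
      constructor
      · rintro (rfl | hmem | hmem)
        · exact Or.inl rfl
        · obtain ⟨y, hy, rfl⟩ := List.mem_map.mp hmem
          exact Or.inl (ht y hy)
        · exact Or.inr hmem
      · rintro (rfl | hmem)
        · exact Or.inl rfl
        · exact Or.inr (Or.inr hmem)
    have hcong : ∀ a ∈ (d.map (·.2)).toFinset,
        ((x :: xs).map (·.2)).count a = (d.map (·.2)).count a := by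
      intro a ha
      have hane : a ≠ x.2 := fun hc => hknot (hc ▸ ha)
      have hat : (t.map (·.2)).count a = 0 := by
        rw [List.count_eq_zero]
        intro hmem
        obtain ⟨y, hy, rfl⟩ := List.mem_map.mp hmem
        exact hane (ht y hy)
      rw [hmapl]
      simp [List.count_append, hat, Ne.symm hane]
    -- put it together
    conv_lhs => rw [prodRuns]
    rw [← hts, ← hds, hIH]
    unfold keyProd
    rw [hfin, Finset.prod_insert hknot, hcnt]
    have : ∏ k ∈ (d.map (·.2)).toFinset, ((((x :: xs).map (·.2)).count k : Int) + 1)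
        = ∏ k ∈ (d.map (·.2)).toFinset, (((d.map (·.2)).count k : Int) + 1) := by
      apply Finset.prod_congr rfl
      intro a ha
      rw [hcong a ha]
    rw [this]
    push_cast
    ring

theorem solution_alt_eq_keyProd (clothes : List (String × String)) :
    solution_alt clothes = keyProd (clothes.map (·.2)) - 1 := by
  unfold solution_alt
  rw [prodRuns_sorted _ (PySem.List.sorted_map_key_pairwise ..)]
  have hperm : ((PySem.List.sorted clothes (fun x => x.2) false).map (·.2)).Perm
      (clothes.map (·.2)) := (PySem.List.sorted_perm ..).map _
  unfold keyProd
  rw [List.toFinset_eq_of_perm _ _ hperm]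
  congr 1
  apply Finset.prod_congr rfl
  intro a _
  rw [hperm.count_eq]

-- ===== VERDICT (by name: the statement is the Claim_ definition above) =====
theorem solution_spec : Claim_equal_solution := by
  intro clothes _
  unfold Spec_solution
  rw [solution_eq_keyProd, solution_alt_eq_keyProd]
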